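-- pv_equiv track=rewrite | github.com/ghiati/Med-ChatBot-using-NLP- | chatbot/preprocess_query.py | match_drug_name
-- ===== SOURCE A (Python) =====
-- def match_drug_name(entities, drug_list):
--     """Match entities to drugs in the list by counting matching words and return the drugs with the highest count."""
--     drug_scores = {}
--
--     for drug in drug_list:
--         # Tokenize the drug name and convert to lowercase
--         drug_words = drug.lower().split()
--         match_count = 0
--
--         # Count how many words from the entities match with the drug name
--         for entity in entities:
--             entity_words = entity.lower().split()
--             for word in entity_words:
--                 if word in drug_words:
--                     match_count += 1
--
--         # Store the match count for this drug
--         drug_scores[drug] = match_count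
--
--     # Find the highest match count
--     max_match = max(drug_scores.values())
--
--     # Return drugs that have the highest match count
--     best_matches = [drug for drug, score in drug_scores.items() if score == max_match]
--
--     return best_matches
-- ===== SOURCE B (Python) =====
-- def match_drug_name(entities, drug_list):
--     """Match entities to drugs by matching-word count via an inverted word->drugs index."""
--     scores = dict.fromkeys(drug_list, 0)
--     index = {}
--     for drug in scores:
--         for word in set(drug.lower().split()):
--             index.setdefault(word, []).append(drug)
--     for entity in entities:
--         for word in entity.lower().split():
--             for drug in index.get(word, ()):
--                 scores[drug] += 1
--     best = max(scores.values())
--     return [drug for drug, score in scores.items() if score == best]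
-- ===== Notes on version B (the rewrite author's own statement) =====
-- stated objective: faster
-- what changed: B replaces A's per-drug rescan of all entity words with a one-pass inverted word->drugs index plus a score dict incremented per entity word, so each entity word is tokenized and looked up once instead of once per drug.
import Mathlib
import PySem

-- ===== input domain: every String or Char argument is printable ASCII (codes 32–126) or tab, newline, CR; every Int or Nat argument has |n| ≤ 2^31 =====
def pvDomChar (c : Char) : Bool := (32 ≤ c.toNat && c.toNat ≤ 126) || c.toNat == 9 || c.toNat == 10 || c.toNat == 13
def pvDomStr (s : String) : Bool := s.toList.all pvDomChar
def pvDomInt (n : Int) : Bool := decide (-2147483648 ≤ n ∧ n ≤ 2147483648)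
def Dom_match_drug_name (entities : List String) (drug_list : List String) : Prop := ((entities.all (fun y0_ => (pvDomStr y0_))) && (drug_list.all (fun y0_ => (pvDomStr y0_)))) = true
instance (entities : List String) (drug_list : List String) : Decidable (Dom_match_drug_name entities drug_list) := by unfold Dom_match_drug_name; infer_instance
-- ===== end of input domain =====

-- B builds a one-pass inverted word→drugs index and a score dict updated per entity word,
-- instead of A's rescan of every entity word for every drug.

-- shared tokenizer: s.lower().split() (both Pythons use this exact expression)
def wordsOf (s : String) : List String := PySem.Str.split₀ (PySem.Str.lower s)

-- ===== PORT A =====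
def match_drug_name (entities : List String) (drug_list : List String) : List String :=
  let drug_scores : PySem.Dict String Int :=
    drug_list.foldl (fun d drug =>
      let drug_words := wordsOf drug
      let match_count : Int :=
        entities.foldl (fun mc entity =>
          (wordsOf entity).foldl (fun mc word => if word ∈ drug_words then mc + 1 else mc) mc) 0
      d.insert drug match_count) PySem.Dict.empty
  match PySem.List.max? drug_scores.values (fun v => v) with
  | none => []   -- Python: max() on an empty dict raises ValueError; excluded by Pre_
  | some mx => (drug_scores.items.filter (fun p => p.2 == mx)).map (fun p => p.1)

-- ===== PORT B =====
def match_drug_name_alt (entities : List String) (drug_list : List String) : List String :=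
  let scores0 : PySem.Dict String Int :=
    drug_list.foldl (fun d k => d.insert k 0) PySem.Dict.empty          -- dict.fromkeys(drug_list, 0)
  let index : PySem.Dict String (List String) :=
    scores0.keys.foldl (fun idx drug =>
      (PySem.Set.ofList (wordsOf drug)).foldl
        (fun idx w => idx.modify w [] (fun l => l ++ [drug])) idx) PySem.Dict.empty
  let scores : PySem.Dict String Int :=
    entities.foldl (fun sc entity =>
      (wordsOf entity).foldl (fun sc w =>
        (index.getD w []).foldl (fun sc drug => sc.modify drug 0 (· + 1)) sc) sc) scores0
  match PySem.List.max? scores.values (fun v => v) with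
  | none => []   -- Python: max() on an empty dict raises ValueError; excluded by Pre_
  | some mx => (scores.items.filter (fun p => p.2 == mx)).map (fun p => p.1)

-- ===== PRECONDITION & SPEC =====
-- Pre_ excludes only drug_list = [], on which both Pythons raise ValueError (max of an empty sequence).
def Pre_match_drug_name (entities : List String) (drug_list : List String) : Prop := drug_list ≠ []
instance (entities : List String) (drug_list : List String) : Decidable (Pre_match_drug_name entities drug_list) := by unfold Pre_match_drug_name; infer_instance
def pvWitness_match_drug_name : List String × List String := (["aspirin forte"], ["Aspirin Forte", "ibuprofen"])

def Spec_match_drug_name (entities : List String) (drug_list : List String) (out : List String) : Prop := out = match_drug_name_alt entities drug_list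
instance (entities : List String) (drug_list : List String) (out : List String) : Decidable (Spec_match_drug_name entities drug_list out) := by unfold Spec_match_drug_name; infer_instance

-- ===== CLAIM (what is proved, stated in full; the proofs are below) =====
def Claim_equal_match_drug_name : Prop := ∀ (entities : List String) (drug_list : List String), Dom_match_drug_name entities drug_list → Pre_match_drug_name entities drug_list → Spec_match_drug_name entities drug_list (match_drug_name entities drug_list)

-- ===== LEMMAS AND PROOFS =====

-- the multiset of entity words, and a drug's matching-word count
def entWords (entities : List String) : List String := entities.flatMap wordsOf

-- A's insert loop: value is a function of the key alone
theorem getD_foldl_insert_keyfn (l : List String) (f : String → Int) (d0 : PySem.Dict String Int)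
    (k : String) (v : Int) :
    (l.foldl (fun d x => d.insert x (f x)) d0).getD k v
      = if k ∈ l then f k else d0.getD k v := by
  induction l generalizing d0 with
  | nil => simp
  | cons x t ih =>
    simp only [List.foldl_cons, ih, List.mem_cons]
    by_cases ht : k ∈ t
    · simp [ht]
    · by_cases hx : k = x
      · simp [ht, hx, PySem.Dict.getD_insert_self]
      · simp [ht, hx, PySem.Dict.getD_insert_of_ne d0 (f x) v hx]

theorem filter_beq_of_nodup (l : List String) (a : String) (h : l.Nodup) :
    l.filter (fun x => x == a) = if a ∈ l then [a] else [] := by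
  induction l with
  | nil => simp
  | cons x t ih =>
    rcases List.nodup_cons.mp h with ⟨hx, ht⟩
    by_cases hax : x = a
    · subst hax
      simp [List.filter_cons, ih ht, hx]
    · simp only [List.filter_cons, beq_iff_eq, hax, if_neg, List.mem_cons, ih ht]
      simp [Ne.symm hax, hax]

theorem count_filter' (l : List String) (p : String → Bool) (a : String) :
    (l.filter p).count a = if p a then l.count a else 0 := by
  induction l with
  | nil => simp
  | cons x t ih =>
    by_cases hp : p x
    · by_cases hax : x = a
      · subst hax; simp [List.filter_cons, hp, List.count_cons, ih]
      · simp [List.filter_cons, hp, List.count_cons, hax, ih, Ne.symm hax]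
    · by_cases hax : x = a
      · subst hax; simp [List.filter_cons, hp, List.count_cons, ih]
      · simp [List.filter_cons, hp, List.count_cons, hax, ih, Ne.symm hax]

theorem count_flatMap' (l : List String) (g : String → List String) (a : String) :
    (l.flatMap g).count a = (l.map (fun x => (g x).count a)).sum := by
  induction l with
  | nil => simp
  | cons x t ih => simp [List.flatMap_cons, List.count_append, ih]

-- the inverted index maps w to the max-score-order list of distinct drugs whose name contains w
set_option maxHeartbeats 1000000 in
theorem flat_filter (dd : List String) (w : String) :
    (((dd.flatMap (fun d => (PySem.Set.ofList (wordsOf d)).map (fun w' => (w', d)))).filter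
        (fun p => p.1 == w)).map (fun x => x.2))
      = dd.filter (fun d => decide (w ∈ wordsOf d)) := by
  induction dd with
  | nil => simp
  | cons d t ih =>
    simp only [List.flatMap_cons, List.filter_append, List.map_append, ih, List.filter_cons]
    have hhead : ((((PySem.Set.ofList (wordsOf d) : List String).map (fun w' => (w', d))).filter
        (fun p => p.1 == w)).map (fun x => x.2))
        = if w ∈ wordsOf d then [d] else [] := by
      rw [List.filter_map, List.map_map]
      have hcomp : ((fun (p : String × String) => p.1 == w) ∘ (fun w' => (w', d))) = fun x => x == w := rfl
      rw [hcomp, filter_beq_of_nodup _ _ (PySem.Set.nodup_ofList (wordsOf d))]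
      by_cases hw : w ∈ wordsOf d
      · have hmem : w ∈ (PySem.Set.ofList (wordsOf d) : List String) := (PySem.Set.mem_ofList _ _).mpr hw
        simp [hmem, hw]
      · have hmem : w ∉ (PySem.Set.ofList (wordsOf d) : List String) :=
          fun h => hw ((PySem.Set.mem_ofList _ _).mp h)
        simp [hmem, hw]
    rw [hhead]
    by_cases hw : w ∈ wordsOf d <;> simp [hw]

-- the inverted index maps w to the list of distinct drugs whose name contains w
set_option maxHeartbeats 1000000 in
theorem index_getD (dd : List String) (w : String) :
    ((dd.foldl (fun idx drug =>
        (PySem.Set.ofList (wordsOf drug)).foldl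
          (fun idx w' => idx.modify w' [] (fun l => l ++ [drug])) idx)
        (PySem.Dict.empty : PySem.Dict String (List String))).getD w [])
      = dd.filter (fun d => decide (w ∈ wordsOf d)) := by
  have hshape : ∀ (idx : PySem.Dict String (List String)),
      (dd.foldl (fun idx drug =>
        (PySem.Set.ofList (wordsOf drug)).foldl
          (fun idx w' => idx.modify w' [] (fun l => l ++ [drug])) idx) idx)
      = ((dd.flatMap (fun d => (PySem.Set.ofList (wordsOf d)).map (fun w' => (w', d)))).foldl
          (fun idx p => idx.modify p.1 [] (fun l => l ++ [p.2])) idx) := by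
    intro idx
    rw [List.foldl_flatMap]
    refine PySem.List.foldl_congr_mem _ _ _ _ (fun acc x _ => ?_)
    rw [List.foldl_map]
  rw [hshape, PySem.Dict.getD_foldl_modify_append]
  simp only [PySem.Dict.getD_empty, List.nil_append]
  exact flat_filter dd w

-- B's score loop flattened: final value at key d
theorem scoresB_getD (W : List String) (g : String → List String) (sc : PySem.Dict String Int) (d : String) :
    ((W.foldl (fun sc w => (g w).foldl (fun sc drug => sc.modify drug 0 (· + 1)) sc) sc).getD d 0)
      = sc.getD d 0 + ((W.flatMap g).count d : Int) := by
  rw [show (W.foldl (fun sc w => (g w).foldl (fun sc drug => sc.modify drug 0 (· + 1)) sc) sc)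
      = ((W.flatMap g).foldl (fun sc drug => sc.modify drug 0 (· + 1)) sc) from (List.foldl_flatMap).symm]
  exact PySem.Dict.getD_foldl_modify_add_one _ _ _

-- A's score: the nested entity loop counts the matching entity words
theorem scoreA_eq (entities : List String) (dw : List String) :
    (entities.foldl (fun mc entity =>
        (wordsOf entity).foldl (fun mc word => if word ∈ dw then mc + 1 else mc) mc) (0 : Int))
      = ((entWords entities).countP (fun w => decide (w ∈ dw)) : Int) := by
  rw [show (entities.foldl (fun mc entity =>
        (wordsOf entity).foldl (fun mc word => if word ∈ dw then mc + 1 else mc) mc) (0 : Int))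
      = ((entities.flatMap wordsOf).foldl (fun mc word => if word ∈ dw then mc + 1 else mc) (0 : Int))
      from (List.foldl_flatMap).symm]
  rw [PySem.List.foldl_ite_add_one]
  simp [entWords]

-- the per-drug count B accumulates equals A's matching-word count, for d in the key list
theorem countB_eq (entities : List String) (dd : List String) (hnd : dd.Nodup) (d : String) (hd : d ∈ dd) :
    (((entWords entities).flatMap (fun w => dd.filter (fun d' => decide (w ∈ wordsOf d')))).count d)
      = (entWords entities).countP (fun w => decide (w ∈ wordsOf d)) := by
  rw [count_flatMap']
  have h1 : ∀ w, (dd.filter (fun d' => decide (w ∈ wordsOf d'))).count d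
      = if decide (w ∈ wordsOf d) then 1 else 0 := by
    intro w
    rw [count_filter']
    by_cases hw : w ∈ wordsOf d
    · simp [hw, List.count_eq_one_of_mem hnd hd]
    · simp [hw]
  calc ((entWords entities).map fun w => (dd.filter (fun d' => decide (w ∈ wordsOf d'))).count d).sum
      = ((entWords entities).map fun w => if decide (w ∈ wordsOf d) then 1 else 0).sum := by
        exact congrArg List.sum (List.map_congr_left (fun w _ => h1 w))
    _ = (entWords entities).countP (fun w => decide (w ∈ wordsOf d)) :=
        PySem.List.sum_map_ite_one_zero_nat _ _

theorem set_update_of_subset (s L : List String) (h : ∀ x ∈ L, x ∈ s) : PySem.Set.update s L = s := by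
  induction L generalizing s with
  | nil => rfl
  | cons x t ih =>
    have hx : x ∈ s := h x (List.mem_cons_self ..)
    show PySem.Set.update (PySem.Set.add s x) t = s
    rw [show PySem.Set.add s x = s by simp [PySem.Set.add, PySem.Set.contains, hx]]
    exact ih s (fun y hy => h y (List.mem_cons_of_mem _ hy))

-- the two dictionaries are equal
set_option maxHeartbeats 1600000 in
theorem dicts_eq (entities : List String) (drug_list : List String) :
    (drug_list.foldl (fun d drug =>
      let drug_words := wordsOf drug
      let match_count : Int :=
        entities.foldl (fun mc entity =>
          (wordsOf entity).foldl (fun mc word => if word ∈ drug_words then mc + 1 else mc) mc) 0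
      d.insert drug match_count) PySem.Dict.empty)
    = (let scores0 : PySem.Dict String Int :=
        drug_list.foldl (fun d k => d.insert k 0) PySem.Dict.empty
       let index : PySem.Dict String (List String) :=
        scores0.keys.foldl (fun idx drug =>
          (PySem.Set.ofList (wordsOf drug)).foldl
            (fun idx w => idx.modify w [] (fun l => l ++ [drug])) idx) PySem.Dict.empty
       entities.foldl (fun sc entity =>
        (wordsOf entity).foldl (fun sc w =>
          (index.getD w []).foldl (fun sc drug => sc.modify drug 0 (· + 1)) sc) sc) scores0) := by
  simp only []
  set dd : List String := PySem.Set.ofList drug_list with hdd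
  have hnd : dd.Nodup := PySem.Set.nodup_ofList _
  -- keys of A's dict and of scores0
  have hkA : (drug_list.foldl (fun d drug =>
      d.insert drug (entities.foldl (fun mc entity =>
          (wordsOf entity).foldl (fun mc word => if word ∈ wordsOf drug then mc + 1 else mc) mc) 0))
      (PySem.Dict.empty : PySem.Dict String Int)).keys = dd := by
    rw [PySem.Dict.keys_foldl_insert]; simp [PySem.Dict.keys_empty]; rfl
  have hk0 : (drug_list.foldl (fun d k => d.insert k (0 : Int)) PySem.Dict.empty).keys = dd := by
    rw [PySem.Dict.keys_foldl_insert]; simp [PySem.Dict.keys_empty]; rfl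
  -- rewrite the index with keys = dd, and name things
  rw [hk0]
  set W : List String := entWords entities with hW
  set scores0 : PySem.Dict String Int :=
    drug_list.foldl (fun d k => d.insert k (0 : Int)) PySem.Dict.empty with hs0
  set idx : PySem.Dict String (List String) :=
    dd.foldl (fun idx drug =>
      (PySem.Set.ofList (wordsOf drug)).foldl
        (fun idx w => idx.modify w [] (fun l => l ++ [drug])) idx) PySem.Dict.empty with hidx
  have hidxg : ∀ w, idx.getD w [] = dd.filter (fun d' => decide (w ∈ wordsOf d')) :=
    fun w => index_getD dd w
  -- B's final dict, flattened
  set scB : PySem.Dict String Int :=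
    entities.foldl (fun sc entity =>
      (wordsOf entity).foldl (fun sc w =>
        (idx.getD w []).foldl (fun sc drug => sc.modify drug 0 (· + 1)) sc) sc) scores0 with hscB
  have hflat : scB = W.foldl (fun sc w =>
      (idx.getD w []).foldl (fun sc drug => sc.modify drug 0 (· + 1)) sc) scores0 := by
    rw [hscB, hW, entWords, ← List.foldl_flatMap, List.foldl_flatMap]
  -- keys of B's final dict
  have hkB : scB.keys = dd := by
    rw [hflat,
      show (fun (sc : PySem.Dict String Int) w =>
        (idx.getD w []).foldl (fun sc drug => sc.modify drug 0 (· + 1)) sc)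
        = (fun sc w => ((fun w => idx.getD w []) w).foldl (fun sc drug => sc.modify drug 0 (· + 1)) sc) from rfl,
      ← List.foldl_flatMap]
    rw [PySem.Dict.keys_foldl_modify, hk0]
    apply set_update_of_subset
    intro x hx
    rcases List.mem_flatMap.mp hx with ⟨w, _, hx⟩
    rw [hidxg w] at hx
    exact List.mem_of_mem_filter hx
  have hndB : scB.keys.Nodup := by rw [hkB]; exact hnd
  have hndA : (drug_list.foldl (fun d drug =>
      d.insert drug (entities.foldl (fun mc entity =>
          (wordsOf entity).foldl (fun mc word => if word ∈ wordsOf drug then mc + 1 else mc) mc) 0))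
      (PySem.Dict.empty : PySem.Dict String Int)).keys.Nodup := by rw [hkA]; exact hnd
  -- items of both dicts
  apply PySem.Dict.ext
  rw [PySem.Dict.items_eq_map_keys _ hndA (0 : Int), PySem.Dict.items_eq_map_keys _ hndB (0 : Int),
    hkA, hkB]
  refine List.map_congr_left (fun d hd => ?_)
  congr 1
  -- A's value at d
  rw [getD_foldl_insert_keyfn]
  have hddl : d ∈ drug_list := by
    have := hd; rw [hdd] at this; exact (PySem.Set.mem_ofList _ _).mp this
  rw [if_pos hddl, scoreA_eq]
  -- B's value at d
  rw [hflat, scoresB_getD W (fun w => idx.getD w []) scores0 d]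
  have h0 : scores0.getD d 0 = 0 := by
    rw [hs0, getD_foldl_insert_keyfn]; simp [hddl, PySem.Dict.getD_empty]
  rw [h0, zero_add]
  rw [show (W.flatMap fun w => idx.getD w []) = W.flatMap (fun w => dd.filter (fun d' => decide (w ∈ wordsOf d'))) from
    List.flatMap_congr (fun w _ => hidxg w)]
  rw [← hW] at *
  rw [countB_eq entities dd hnd d hd]

-- ===== VERDICT (by name: the statement is the Claim_ definition above) =====
theorem match_drug_name_spec : Claim_equal_match_drug_name := by
  intro entities drug_list _ _
  show match_drug_name entities drug_list = match_drug_name_alt entities drug_list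
  unfold match_drug_name match_drug_name_alt
  simp only []
  rw [dicts_eq entities drug_list]
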